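-- pv_equiv track=rewrite | github.com/djkostyan4ik/pp1 | 05-Test1/Test 1/p4.py | f
-- ===== SOURCE A (Python) =====
-- def f(w):
--     result = ''
--     position = 1
--     for i in w:
--         position += 1
--         if position % 2 == 0:
--             result += str(i) + '+'
--         else:
--             result += str(i) + '-'
--
--     return result[:-1]
-- ===== SOURCE B (Python) =====
-- def f(w):
--     items = [str(x) for x in w]
--     chunks = []
--     i = 0
--     while i < len(items):
--         chunks.append('+'.join(items[i:i+2]))
--         i += 2
--     return '-'.join(chunks)
-- ===== Notes on version B (the rewrite author's own statement) =====
-- stated objective: alternative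
-- what changed: Instead of A's single pass appending str(i) plus a '+' or '-' chosen by a position-parity counter and stripping the trailing separator, B stringifies all items, chunks them into consecutive pairs joined with '+', and joins the chunks with '-' (no counter, no strip).
import Mathlib
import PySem

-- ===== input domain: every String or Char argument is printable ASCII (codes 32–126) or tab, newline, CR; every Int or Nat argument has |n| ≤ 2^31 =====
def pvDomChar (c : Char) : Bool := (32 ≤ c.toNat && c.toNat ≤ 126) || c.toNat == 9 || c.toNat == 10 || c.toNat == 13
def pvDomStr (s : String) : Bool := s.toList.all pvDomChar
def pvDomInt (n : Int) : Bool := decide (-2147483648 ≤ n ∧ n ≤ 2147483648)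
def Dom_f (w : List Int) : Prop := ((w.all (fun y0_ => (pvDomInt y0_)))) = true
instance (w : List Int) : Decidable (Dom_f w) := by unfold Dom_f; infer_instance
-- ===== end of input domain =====

-- B rebuilds the string by a different decomposition (pair chunks joined '+'-inside, '-'-between)
-- instead of A's running accumulator with a position counter and a final strip; objective: alternative.

-- ===== PORT A =====
-- A: accumulate result string and position counter over w, append str(i) plus '+' or '-' by parity,
-- finally drop the trailing separator with result[:-1]. State kept as List Char for kernel transparency.
def f (w : List Int) : String :=
  let st := w.foldl (fun (s : List Char × Int) i =>
    let p := s.2 + 1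
    if PySem.Int.mod p 2 == 0 then (s.1 ++ PySem.Int.toChars i ++ ['+'], p)
    else (s.1 ++ PySem.Int.toChars i ++ ['-'], p)) ([], 1)
  String.ofList (PySem.List.slice st.1 none (some (-1)))

-- ===== PORT B =====
-- B helper: the while loop — while i < len(items): chunks.append('+'.join(items[i:i+2])); i += 2 —
-- with i and the chunks accumulator as parameters
def chunksB (items : List (List Char)) (i : Int) (acc : List (List Char)) : List (List Char) :=
  if i < (items.length : Int) then
    chunksB items (i + 2)
      (acc ++ [PySem.Chars.join ['+'] (PySem.List.slice items (some i) (some (i + 2)))])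
  else acc
termination_by ((items.length : Int) - i).toNat
decreasing_by
  rename_i h
  omega

def f_alt (w : List Int) : String :=
  String.ofList (PySem.Chars.join ['-'] (chunksB (w.map PySem.Int.toChars) 0 []))

-- ===== PRECONDITION & SPEC =====
def Spec_f (w : List Int) (out : String) : Prop := out = f_alt w
instance (w : List Int) (out : String) : Decidable (Spec_f w out) := by unfold Spec_f; infer_instance

-- ===== CLAIM (what is proved, stated in full; the proofs are below) =====
def Claim_equal_f : Prop := ∀ (w : List Int), Dom_f w → Spec_f w (f w)

-- ===== LEMMAS AND PROOFS =====

-- proof-side pure recursion computing the chunk list without the accumulator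
def chunksR : List (List Char) → List (List Char)
  | [] => []
  | a :: rest =>
      PySem.Chars.join ['+'] (PySem.List.slice (a :: rest) none (some 2)) ::
      chunksR (PySem.List.slice (a :: rest) (some 2) none)
termination_by items => items.length
decreasing_by
  simp [PySem.List.slice_from (a :: rest) (a := 2) (by norm_num)]

theorem chunksB_eq : ∀ (items : List (List Char)) (n : Nat) (acc : List (List Char)),
    chunksB items (n : Int) acc = acc ++ chunksR (items.drop n)
  | items, n, acc => by
    rw [chunksB]
    by_cases h : (n : Int) < (items.length : Int)
    · rw [if_pos h]
      have hn : n < items.length := by exact_mod_cast h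
      rw [show ((n : Int) + 2) = ((n + 2 : Nat) : Int) by push_cast; ring,
          chunksB_eq items (n + 2) _]
      have hslice : PySem.List.slice items (some (n : Int)) (some ((n + 2 : Nat) : Int))
          = List.take 2 (items.drop n) := by
        rw [PySem.List.slice_natCast]
        congr 1
        omega
      cases hd : items.drop n with
      | nil => exact absurd hd (by simp; omega)
      | cons a rest =>
        rw [chunksR, PySem.List.slice_to _ (b := 2) (by norm_num),
            PySem.List.slice_from _ (a := 2) (by norm_num),
            show ((2:Int)).toNat = 2 from rfl, ← hd, List.drop_drop, hslice]
        simp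
    · rw [if_neg h]
      have : items.length ≤ n := by omega
      rw [List.drop_of_length_le this]
      rw [chunksR]
      simp
termination_by items n _ => items.length - n
decreasing_by
  omega

-- the string A's loop appends when started at position counter p
def altStr : List Int → Int → List Char
  | [], _ => []
  | i :: t, p =>
      PySem.Int.toChars i ++
      [if PySem.Int.mod (p + 1) 2 == 0 then '+' else '-'] ++ altStr t (p + 1)

theorem altStr_parity : ∀ (t : List Int) (p q : Int),
    PySem.Int.mod p 2 = PySem.Int.mod q 2 → altStr t p = altStr t q := by
  intro t
  induction t with
  | nil => intro p q _; rfl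
  | cons i t ih =>
    intro p q h
    have h2 : (0:Int) < 2 := by norm_num
    rw [PySem.Int.mod_eq_emod_of_pos h2, PySem.Int.mod_eq_emod_of_pos h2] at h
    have h' : PySem.Int.mod (p + 1) 2 = PySem.Int.mod (q + 1) 2 := by
      rw [PySem.Int.mod_eq_emod_of_pos h2, PySem.Int.mod_eq_emod_of_pos h2]
      omega
    simp only [altStr, h', ih (p + 1) (q + 1) h']

theorem altStr_ne_nil (i : Int) (t : List Int) (p : Int) : altStr (i :: t) p ≠ [] := by
  simp [altStr]

theorem foldA : ∀ (w : List Int) (s : List Char) (p : Int),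
    (w.foldl (fun (s : List Char × Int) i =>
      if PySem.Int.mod (s.2 + 1) 2 == 0 then (s.1 ++ PySem.Int.toChars i ++ ['+'], s.2 + 1)
      else (s.1 ++ PySem.Int.toChars i ++ ['-'], s.2 + 1)) (s, p)).1 = s ++ altStr w p := by
  intro w
  induction w with
  | nil => intro s p; simp [altStr]
  | cons i t ih =>
    intro s p
    rw [List.foldl_cons]
    by_cases h : PySem.Int.mod (p + 1) 2 == 0
    · beta_reduce
      rw [if_pos h, ih]
      simp [altStr]
      exact (PySem.Int.mod_eq_zero_iff_dvd _ _).mp (by simpa using h)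
    · beta_reduce
      rw [if_neg h, ih]
      simp [altStr]
      have hd : ¬ (2 ∣ p + 1) := fun hd => h (by simp [hd])
      omega

theorem main_lemma : ∀ (w : List Int),
    (altStr w 1).dropLast = PySem.Chars.join ['-'] (chunksR (w.map PySem.Int.toChars))
  | [] => by
      rw [List.map_nil, chunksR, PySem.Chars.join_nil]
      rfl
  | [a] => by
      rw [List.map_cons, List.map_nil, chunksR]
      rw [PySem.List.slice_to _ (b := 2) (by norm_num),
          PySem.List.slice_from _ (a := 2) (by norm_num)]
      simp only [show ((2:Int)).toNat = 2 from rfl, List.take_succ_cons, List.take_nil,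
        List.drop_succ_cons, List.drop_nil]
      rw [chunksR, PySem.Chars.join_singleton, PySem.Chars.join_singleton]
      simp only [altStr]
      rw [show (if PySem.Int.mod (1 + 1) 2 == 0 then '+' else '-') = '+' from by decide]
      simp [List.dropLast_append_of_ne_nil]
  | a :: b :: t => by
      have h3 : altStr t (1 + 1 + 1) = altStr t 1 := altStr_parity t (1 + 1 + 1) 1 (by decide)
      rw [List.map_cons, List.map_cons, chunksR]
      rw [PySem.List.slice_to _ (b := 2) (by norm_num),
          PySem.List.slice_from _ (a := 2) (by norm_num)]
      simp only [show ((2:Int)).toNat = 2 from rfl, List.take_succ_cons, List.take_zero,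
        List.drop_succ_cons, List.drop_zero]
      simp only [altStr]
      rw [show (if PySem.Int.mod (1 + 1) 2 == 0 then '+' else '-') = '+' from by decide]
      rw [show (if PySem.Int.mod (1 + 1 + 1) 2 == 0 then '+' else '-') = '-' from by decide]
      rw [h3, PySem.Chars.join_cons_cons]
      cases t with
      | nil =>
        rw [List.map_nil, chunksR]
        rw [show altStr [] 1 = [] from rfl]
        simp only [PySem.Chars.join_singleton]
        rw [show (PySem.Int.toChars a ++ ['+'] ++ (PySem.Int.toChars b ++ ['-'] ++ []))
              = (PySem.Int.toChars a ++ ['+'] ++ PySem.Int.toChars b) ++ ['-'] by simp,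
            List.dropLast_concat]
      | cons c t' =>
        have hne : altStr (c :: t') 1 ≠ [] := altStr_ne_nil c t' 1
        have hrec := main_lemma (c :: t')
        rw [List.map_cons, chunksR] at hrec ⊢
        rw [List.append_assoc, List.append_assoc, List.append_assoc,
            List.dropLast_append_of_ne_nil (by simp),
            List.dropLast_append_of_ne_nil (by simp),
            List.dropLast_append_of_ne_nil (by simp),
            List.dropLast_append_of_ne_nil hne]
        rw [PySem.Chars.join_cons_cons, hrec]
        simp
termination_by w => w.length

-- ===== VERDICT (by name: the statement is the Claim_ definition above) =====
theorem f_spec : Claim_equal_f := by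
  intro w _
  unfold Spec_f f f_alt
  simp only []
  rw [foldA w [] 1]
  simp only [List.nil_append, PySem.List.slice_to_neg_one]
  rw [main_lemma w, show (0:Int) = ((0:Nat):Int) from rfl, chunksB_eq, List.drop_zero,
      List.nil_append]
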